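-- pv_equiv track=rewrite | github.com/mmosh-pit/kinship | kinship-knowledge/app/core/mechanic_compatibility.py | check_consecutive_repetition
-- ===== SOURCE A (Python) =====
-- def check_consecutive_repetition(sequence: list[str]) -> list[str]:
--     """
--     Check for consecutive same mechanic (bad: A → A → A).
--
--     Returns:
--         List of violations
--     """
--     violations = []
--
--     for i in range(len(sequence) - 1):
--         if sequence[i] == sequence[i + 1]:
--             violations.append(
--                 f"Consecutive repetition: '{sequence[i]}' at positions {i} and {i+1}"
--             )
--
--     return violations
-- ===== SOURCE B (Python) =====
-- def check_consecutive_repetition(sequence: list[str]) -> list[str]: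
--     """
--     Check for consecutive same mechanic (bad: A -> A -> A).
--
--     Run-based re-implementation: scan maximal runs of equal consecutive
--     mechanics; a run occupying positions i..j-1 contributes one violation
--     per adjacent pair inside it (positions i..j-2).
--     """
--     violations = []
--     i = 0
--     n = len(sequence)
--     while i < n:
--         j = i + 1
--         while j < n and sequence[j] == sequence[i]:
--             j += 1
--         key = sequence[i]
--         violations.extend(
--             f"Consecutive repetition: '{key}' at positions {p} and {p+1}"
--             for p in range(i, j - 1)
--         )
--         i = j
--     return violations
-- ===== Notes on version B (the rewrite author's own statement) =====
-- stated objective: alternative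
-- what changed: B partitions the sequence into maximal runs of equal consecutive mechanics and emits all violations of a run at once from its start index and length, instead of A's per-index comparison of every adjacent pair.
import Mathlib
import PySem

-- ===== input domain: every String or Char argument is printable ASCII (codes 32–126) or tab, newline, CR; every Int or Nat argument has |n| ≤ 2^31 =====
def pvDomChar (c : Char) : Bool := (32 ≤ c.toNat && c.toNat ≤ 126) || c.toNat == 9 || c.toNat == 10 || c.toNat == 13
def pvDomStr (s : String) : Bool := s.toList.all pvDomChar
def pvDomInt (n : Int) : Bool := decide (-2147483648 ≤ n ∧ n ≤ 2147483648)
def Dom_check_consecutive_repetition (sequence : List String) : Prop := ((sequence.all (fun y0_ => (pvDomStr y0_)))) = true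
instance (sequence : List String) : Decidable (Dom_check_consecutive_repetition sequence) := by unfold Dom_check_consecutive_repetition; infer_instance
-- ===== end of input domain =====

-- B replaces A's per-index adjacent-pair loop by a scan over maximal runs of
-- equal consecutive mechanics (objective: alternative decomposition, same cost).

-- ===== PORT A =====
-- the f-string (shared by both Pythons verbatim)
def pvMsg (x : String) (i : Int) : String :=
  PySem.Str.join "" ["Consecutive repetition: '", x, "' at positions ", PySem.Int.toStr i, " and ", PySem.Int.toStr (i + 1)]

-- literal port of A: for i in range(len(sequence)-1): compare sequence[i], sequence[i+1]
-- (indices are always in range, so pyGetD is exact here)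
def check_consecutive_repetition (sequence : List String) : List String :=
  (PySem.List.pyRange 0 ((sequence.length : Int) - 1) 1).foldl
    (fun violations i =>
      if PySem.List.pyGetD sequence i "" = PySem.List.pyGetD sequence (i + 1) "" then
        violations ++ [pvMsg (PySem.List.pyGetD sequence i "") i]
      else violations) []

-- ===== PORT B =====
-- inner while loop of Source B: the run of elements equal to the head is its takeWhile,
-- j = i + 1 + run.length; the generator over range(i, j-1) is the map below.
def pvAltGo (start : Int) (l : List String) : List String :=
  match l with
  | [] => []
  | x :: rest =>
      (PySem.List.pyRange start (start + (rest.takeWhile (fun y => y == x)).length) 1).map (fun p => pvMsg x p)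
        ++ pvAltGo (start + (rest.takeWhile (fun y => y == x)).length + 1) (rest.dropWhile (fun y => y == x))
termination_by l.length
decreasing_by
  have := List.length_dropWhile_le (fun y => y == x) rest
  simp; omega

def check_consecutive_repetition_alt (sequence : List String) : List String :=
  pvAltGo 0 sequence

-- ===== PRECONDITION & SPEC =====
def Spec_check_consecutive_repetition (sequence : List String) (out : List String) : Prop := out = check_consecutive_repetition_alt sequence
instance (sequence : List String) (out : List String) : Decidable (Spec_check_consecutive_repetition sequence out) := by unfold Spec_check_consecutive_repetition; infer_instance

-- ===== CLAIM (what is proved, stated in full; the proofs are below) =====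
def Claim_equal_check_consecutive_repetition : Prop := ∀ (sequence : List String), Dom_check_consecutive_repetition sequence → Spec_check_consecutive_repetition sequence (check_consecutive_repetition sequence)

-- ===== LEMMAS AND PROOFS =====

-- common reference shape: structural recursion over adjacent pairs
def pvCore (start : Int) : List String → List String
  | a :: b :: rest => (if a = b then [pvMsg a start] else []) ++ pvCore (start + 1) (b :: rest)
  | _ => []

lemma pvA_core (s : List String) : ∀ (start : Int) (acc : List String),
    (List.range (s.length - 1)).foldl
      (fun acc k => if s.getD k "" = s.getD (k + 1) "" then acc ++ [pvMsg (s.getD k "") (start + (k : Int))] else acc) acc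
      = acc ++ pvCore start s := by
  induction s with
  | nil => intro start acc; simp [pvCore]
  | cons a t ih =>
    intro start acc
    match t with
    | [] => simp [pvCore]
    | b :: r =>
      have hlen : (a :: b :: r).length - 1 = r.length + 1 := by simp
      rw [hlen, List.range_succ_eq_map]
      simp only [List.foldl_cons, List.foldl_map]
      have hstep : ∀ (acc' : List String),
          (List.range r.length).foldl
            (fun acc k => if (a :: b :: r).getD (Nat.succ k) "" = (a :: b :: r).getD (Nat.succ k + 1) ""
              then acc ++ [pvMsg ((a :: b :: r).getD (Nat.succ k) "") (start + (Nat.succ k : Int))] else acc) acc'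
          = acc' ++ pvCore (start + 1) (b :: r) := by
        intro acc'
        have := ih (start + 1) acc'
        have hl : (b :: r).length - 1 = r.length := by simp
        rw [hl] at this
        rw [← this]
        apply PySem.List.foldl_congr_mem
        intro acc2 k _
        have harith : start + ((k : Int) + 1) = start + 1 + (k : Int) := by ring
        simp [harith]
      rw [hstep]
      simp only [List.getD_cons_zero, List.getD_cons_succ, Nat.cast_zero, add_zero, pvCore]
      by_cases hab : a = b <;> simp [hab]

lemma pvA_eq (s : List String) : check_consecutive_repetition s = pvCore 0 s := by
  unfold check_consecutive_repetition
  rw [PySem.List.pyRange_one]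
  have h1 : (((s.length : Int) - 1) - 0).toNat = s.length - 1 := by omega
  rw [h1, List.foldl_map]
  have h2 : ∀ (acc : List String) (k : Nat), k ∈ List.range (s.length - 1) →
      (if PySem.List.pyGetD s (0 + (k : Int)) "" = PySem.List.pyGetD s (0 + (k : Int) + 1) "" then
        acc ++ [pvMsg (PySem.List.pyGetD s (0 + (k : Int)) "") (0 + (k : Int))] else acc)
      = (if s.getD k "" = s.getD (k + 1) "" then acc ++ [pvMsg (s.getD k "") ((k : Int))] else acc) := by
    intro acc k _
    have e1 : (0 : Int) + (k : Int) = ((k : Nat) : Int) := by ring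
    have e2 : (k : Int) + 1 = (((k + 1 : Nat)) : Int) := by push_cast; ring
    rw [e1, e2, PySem.List.pyGetD_natCast, PySem.List.pyGetD_natCast]
  refine Eq.trans (PySem.List.foldl_congr_mem _ _ _ _ h2) ?_
  simpa using pvA_core s 0 []

lemma pvAltGo_cons2_eq (start : Int) (x : String) (r : List String) :
    pvAltGo start (x :: x :: r) = pvMsg x start :: pvAltGo (start + 1) (x :: r) := by
  rw [pvAltGo, pvAltGo]
  simp only [List.takeWhile_cons, beq_self_eq_true, if_true, List.dropWhile_cons,
    List.length_cons]
  have hc := PySem.List.pyRange_one_cons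
    (a := start) (b := start + (((r.takeWhile (fun y => y == x)).length + 1 : Nat) : Int))
    (by push_cast; omega)
  rw [hc]
  simp only [List.map_cons, List.cons_append]
  push_cast
  ring_nf

lemma pvB_eq (s : List String) : ∀ start : Int, pvAltGo start s = pvCore start s := by
  induction s with
  | nil => intro start; rw [pvAltGo]; simp [pvCore]
  | cons x rest ih =>
    intro start
    match rest with
    | [] =>
      rw [pvAltGo]
      rw [show (List.takeWhile (fun y => y == x) ([] : List String)) = [] from rfl]
      simp only [List.length_nil, Nat.cast_zero, add_zero]
      rw [PySem.List.pyRange_one_eq_nil (a := start) (b := start) le_rfl]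
      simp [pvCore, pvAltGo]
    | y :: r =>
      by_cases h : y = x
      · subst h
        rw [pvAltGo_cons2_eq, ih (start + 1)]
        simp [pvCore]
      · rw [pvAltGo]
        have hbx : (y == x) = false := by simp [h]
        simp only [List.takeWhile_cons, hbx, if_false, List.dropWhile_cons, Bool.false_eq_true,
          List.length_nil, Nat.cast_zero, add_zero]
        rw [PySem.List.pyRange_one_eq_nil (a := start) (b := start) le_rfl]
        simp only [List.map_nil, List.nil_append]
        rw [ih (start + 1)]
        have h' : x ≠ y := fun e => h e.symm
        simp [pvCore, h']

-- ===== VERDICT (by name: the statement is the Claim_ definition above) =====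
theorem check_consecutive_repetition_spec : Claim_equal_check_consecutive_repetition := by
  intro s _
  unfold Spec_check_consecutive_repetition check_consecutive_repetition_alt
  rw [pvA_eq, pvB_eq]
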